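-- pv_equiv track=rewrite | github.com/kunhee94/swea | 정리/자습/4613.py | flag_color
-- ===== SOURCE A (Python) =====
-- def flag_color(arr):
--     M = len(arr)
--     result = []
--     cnt = 0
--     for y in range(M):
--         if arr[y] != ['W']:
--             cnt += 1
--     result.append(cnt)
--     cnt = 0
--     for y in range(M):
--         if arr[y] != ['B']:
--             cnt += 1
--     result.append(cnt)
--     cnt = 0
--     for y in range(M):
--         if arr[y] != ['R']:
--             cnt += 1
--     result.append(cnt)
--     return result
-- ===== SOURCE B (Python) =====
-- def flag_color(arr):
--     cW = cB = cR = 0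
--     for row in arr:
--         if row == ['W']:
--             cW += 1
--         elif row == ['B']:
--             cB += 1
--         elif row == ['R']:
--             cR += 1
--     M = len(arr)
--     return [M - cW, M - cB, M - cR]
-- ===== Notes on version B (the rewrite author's own statement) =====
-- stated objective: simpler
-- what changed: Replaces A's three separate inequality-counting passes over arr with one equality-tally pass (three counters cW/cB/cR) and complement arithmetic M - c at the end.
import Mathlib
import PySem

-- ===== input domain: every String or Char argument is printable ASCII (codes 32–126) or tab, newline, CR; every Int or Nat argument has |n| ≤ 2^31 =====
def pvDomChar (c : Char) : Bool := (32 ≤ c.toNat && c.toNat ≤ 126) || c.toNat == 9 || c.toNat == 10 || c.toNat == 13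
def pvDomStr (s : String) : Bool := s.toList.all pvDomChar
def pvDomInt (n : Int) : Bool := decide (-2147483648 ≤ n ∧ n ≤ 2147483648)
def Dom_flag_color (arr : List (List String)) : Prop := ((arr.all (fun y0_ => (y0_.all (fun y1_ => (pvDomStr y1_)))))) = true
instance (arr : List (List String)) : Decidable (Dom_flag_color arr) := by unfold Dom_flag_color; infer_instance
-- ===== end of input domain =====

-- B replaces A's three inequality-counting passes with one equality-tally pass and complement arithmetic (objective: simpler).

-- ===== PORT A =====
def flag_color (arr : List (List String)) : List Int :=
  let M : Int := arr.length
  let result : List Int := []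
  let cnt : Int := (PySem.List.pyRange 0 M 1).foldl
    (fun cnt y => if PySem.List.pyGetD arr y [] ≠ ["W"] then cnt + 1 else cnt) 0
  let result := result ++ [cnt]
  let cnt : Int := (PySem.List.pyRange 0 M 1).foldl
    (fun cnt y => if PySem.List.pyGetD arr y [] ≠ ["B"] then cnt + 1 else cnt) 0
  let result := result ++ [cnt]
  let cnt : Int := (PySem.List.pyRange 0 M 1).foldl
    (fun cnt y => if PySem.List.pyGetD arr y [] ≠ ["R"] then cnt + 1 else cnt) 0
  result ++ [cnt]

-- ===== PORT B =====
def flag_color_alt (arr : List (List String)) : List Int :=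
  let c := arr.foldl
    (fun (c : Int × Int × Int) row =>
      if row = ["W"] then (c.1 + 1, c.2.1, c.2.2)
      else if row = ["B"] then (c.1, c.2.1 + 1, c.2.2)
      else if row = ["R"] then (c.1, c.2.1, c.2.2 + 1)
      else c) (0, 0, 0)
  let M : Int := arr.length
  [M - c.1, M - c.2.1, M - c.2.2]

-- ===== PRECONDITION & SPEC =====
def Spec_flag_color (arr : List (List String)) (out : List Int) : Prop := out = flag_color_alt arr
instance (arr : List (List String)) (out : List Int) : Decidable (Spec_flag_color arr out) := by unfold Spec_flag_color; infer_instance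

-- ===== CLAIM (what is proved, stated in full; the proofs are below) =====
def Claim_equal_flag_color : Prop := ∀ (arr : List (List String)), Dom_flag_color arr → Spec_flag_color arr (flag_color arr)

-- ===== LEMMAS AND PROOFS =====

-- the equality-tally step of B
def pvStepB (c : Int × Int × Int) (row : List String) : Int × Int × Int :=
  if row = ["W"] then (c.1 + 1, c.2.1, c.2.2)
  else if row = ["B"] then (c.1, c.2.1 + 1, c.2.2)
  else if row = ["R"] then (c.1, c.2.1, c.2.2 + 1)
  else c

-- B's triple fold is three independent equality tallies
lemma pvTriple (arr : List (List String)) (c : Int × Int × Int) :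
    arr.foldl pvStepB c =
      (arr.foldl (fun a row => if row = ["W"] then a + 1 else a) c.1,
       arr.foldl (fun a row => if row = ["B"] then a + 1 else a) c.2.1,
       arr.foldl (fun a row => if row = ["R"] then a + 1 else a) c.2.2) := by
  induction arr generalizing c with
  | nil => rfl
  | cons x xs ih =>
    simp only [List.foldl_cons, pvStepB]
    split_ifs <;> simp_all

-- inequality tally + equality tally = accumulators + length
lemma pvNeAddEq (s : List String) (arr : List (List String)) (a b : Int) :
    arr.foldl (fun cnt row => if row = s then cnt else cnt + 1) a
      + arr.foldl (fun c row => if row = s then c + 1 else c) b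
    = a + b + arr.length := by
  induction arr generalizing a b with
  | nil => simp
  | cons x xs ih =>
    simp only [List.foldl_cons, List.length_cons]
    by_cases h : x = s
    · rw [if_pos h, if_pos h, ih]; push_cast; ring
    · rw [if_neg h, if_neg h, ih]; push_cast; ring

lemma pvNeEq (s : List String) (arr : List (List String)) :
    arr.foldl (fun cnt row => if row = s then cnt else cnt + 1) (0 : Int)
    = (arr.length : Int) - arr.foldl (fun c row => if row = s then c + 1 else c) (0 : Int) := by
  have := pvNeAddEq s arr 0 0
  omega

-- ===== VERDICT (by name: the statement is the Claim_ definition above) =====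
theorem flag_color_spec : Claim_equal_flag_color := by
  intro arr _
  show flag_color arr = flag_color_alt arr
  unfold flag_color flag_color_alt
  simp only [show (fun (c : Int × Int × Int) row =>
      if row = ["W"] then (c.1 + 1, c.2.1, c.2.2)
      else if row = ["B"] then (c.1, c.2.1 + 1, c.2.2)
      else if row = ["R"] then (c.1, c.2.1, c.2.2 + 1)
      else c) = pvStepB from rfl]
  rw [PySem.List.foldl_pyRange_zero_pyGetD' arr [] (fun cnt row => if row ≠ ["W"] then cnt + 1 else cnt) 0,
      PySem.List.foldl_pyRange_zero_pyGetD' arr [] (fun cnt row => if row ≠ ["B"] then cnt + 1 else cnt) 0,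
      PySem.List.foldl_pyRange_zero_pyGetD' arr [] (fun cnt row => if row ≠ ["R"] then cnt + 1 else cnt) 0,
      pvTriple]
  simp [pvNeEq]
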